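-- pv_equiv track=rewrite | github.com/cjcaio/AdventOfCode | DayThree/main.py | look_for_m
-- ===== SOURCE A (Python) =====
-- def look_for_m(input):
--     possible = []
--     for i in input:
--         for j in range(len(i)):
--             if i[j] == 'm':
--                 if i[j+3] == '(':
--                     possible.append(i[j:j+12])
--
--     return possible
-- ===== SOURCE B (Python) =====
-- def look_for_m(input):
--     possible = []
--     for i in input:
--         parts = i.split('m')
--         pos = len(parts[0])
--         for part in parts[1:]:
--             if i[pos + 3:pos + 4] == '(':
--                 possible.append(i[pos:pos + 12])
--             pos += 1 + len(part)
--     return possible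
-- ===== Notes on version B (the rewrite author's own statement) =====
-- stated objective: alternative
-- what changed: Replaces A's per-index nested scan with a staged decomposition: each string is split on 'm' once, then the parts are walked with a cumulative position counter (the 'm' occurrences are exactly the part boundaries), testing the following '(' with a raise-free one-char slice i[pos+3:pos+4].
-- outside the precondition, e.g. on look_for_m(['m']): A raises IndexError, B returns []
import Mathlib
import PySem

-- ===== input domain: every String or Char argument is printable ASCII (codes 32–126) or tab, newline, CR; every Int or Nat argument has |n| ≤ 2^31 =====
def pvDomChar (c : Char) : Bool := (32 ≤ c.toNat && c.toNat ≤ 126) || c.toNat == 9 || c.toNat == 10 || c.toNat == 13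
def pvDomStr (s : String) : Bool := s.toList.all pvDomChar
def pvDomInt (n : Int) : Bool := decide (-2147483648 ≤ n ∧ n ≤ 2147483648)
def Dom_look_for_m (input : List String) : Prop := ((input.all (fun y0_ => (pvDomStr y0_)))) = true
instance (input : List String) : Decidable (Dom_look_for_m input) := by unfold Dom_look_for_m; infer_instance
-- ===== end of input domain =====

-- B replaces A's per-index scan with a staged decomposition: split each string on 'm' once,
-- then walk the resulting parts with a cumulative position counter (the 'm' occurrences are
-- exactly the part boundaries) and a raise-free one-char slice test for the '('.
-- Equivalence is on the return value, on inputs where Python A does not raise (Pre_).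

-- ===== PORT A =====
def look_for_m (input : List String) : List String :=
  input.foldl (fun possible i =>
    (PySem.List.pyRange 0 (PySem.Str.len i) 1).foldl (fun possible j =>
      if PySem.Str.pyGet? i j = some 'm' then
        match PySem.Str.pyGet? i (j + 3) with
        | some c => if c = '(' then possible ++ [PySem.Str.slice i (some j) (some (j + 12))] else possible
        | none => possible  -- Python raises IndexError here; excluded by Pre_look_for_m
      else possible) possible) []

-- ===== PORT B =====
def look_for_m_alt (input : List String) : List String :=
  input.foldl (fun possible i =>
    -- parts = i.split('m'); 'm' ≠ '' so split? is always some
    let parts := (PySem.Str.split? i "m").getD []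
    -- pos = len(parts[0]); then the walk over parts[1:] carrying (possible, pos)
    ((parts.drop 1).foldl (fun (st : List String × Int) part =>
        (if PySem.Str.slice i (some (st.2 + 3)) (some (st.2 + 4)) = "(" then
           st.1 ++ [PySem.Str.slice i (some st.2) (some (st.2 + 12))]
         else st.1,
         st.2 + 1 + PySem.Str.len part))
      (possible, PySem.Str.len (parts.headD ""))).1) []

-- ===== PRECONDITION & SPEC =====
-- Pre_ excludes exactly the inputs on which Python A raises IndexError: a string with an 'm'
-- at a position j with j+3 ≥ its length.
def Pre_look_for_m (input : List String) : Prop :=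
  (input.all fun i => (List.range i.toList.length).all fun j =>
    !(i.toList[j]? == some 'm') || decide (j + 3 < i.toList.length)) = true
instance (input : List String) : Decidable (Pre_look_for_m input) := by unfold Pre_look_for_m; infer_instance
def pvWitness_look_for_m : List String := ["xmul(2,3)do"]

def Spec_look_for_m (input : List String) (out : List String) : Prop := out = look_for_m_alt input
instance (input : List String) (out : List String) : Decidable (Spec_look_for_m input out) := by unfold Spec_look_for_m; infer_instance

-- ===== CLAIM (what is proved, stated in full; the proofs are below) =====
def Claim_equal_look_for_m : Prop := ∀ (input : List String), Dom_look_for_m input → Pre_look_for_m input → Spec_look_for_m input (look_for_m input)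

-- ===== LEMMAS AND PROOFS =====

-- specification-level recursions used only by the proofs
def splitM : List Char → List (List Char)
  | [] => [[]]
  | c :: t => if c = 'm' then [] :: splitM t else (splitM t).modifyHead (c :: ·)

def mPos : List Char → List Nat
  | [] => []
  | c :: t => if c = 'm' then 0 :: (mPos t).map (· + 1) else (mPos t).map (· + 1)

-- B's per-m step, as a named function
def stepB (i : String) (possible : List String) (pos : Int) : List String :=
  if PySem.Str.slice i (some (pos + 3)) (some (pos + 4)) = "(" then
    possible ++ [PySem.Str.slice i (some pos) (some (pos + 12))]
  else possible

theorem splitM_ne_nil (l : List Char) : splitM l ≠ [] := by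
  cases l with
  | nil => simp [splitM]
  | cons c t =>
    simp only [splitM]
    split_ifs
    · simp
    · cases h : splitM t with
      | nil => exact absurd h (splitM_ne_nil t)
      | cons q qs => simp [List.modifyHead]

theorem splitOn_go_eq (fuel : Nat) (l cur : List Char) (acc : List (List Char))
    (hf : l.length ≤ fuel) :
    PySem.Chars.splitOn.go ['m'] fuel l cur acc
      = acc.reverse ++ (splitM l).modifyHead (cur.reverse ++ ·) := by
  induction fuel generalizing l cur acc with
  | zero =>
    have : l = [] := by cases l <;> simp_all
    subst this
    simp [PySem.Chars.splitOn.go, splitM, List.modifyHead]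
  | succ f ih =>
    cases l with
    | nil => simp [PySem.Chars.splitOn.go, splitM, List.modifyHead]
    | cons c rest =>
      by_cases hc : c = 'm'
      · subst hc
        have hpre : List.isPrefixOf ['m'] ('m' :: rest) = true := by simp [List.isPrefixOf]
        rw [show PySem.Chars.splitOn.go ['m'] (f + 1) ('m' :: rest) cur acc
              = PySem.Chars.splitOn.go ['m'] f (List.drop 1 ('m' :: rest)) [] (cur.reverse :: acc) from by
          conv_lhs => rw [PySem.Chars.splitOn.go]
          simp [hpre]]
        rw [ih _ _ _ (by simpa using hf)]
        cases h : splitM rest with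
        | nil => exact absurd h (splitM_ne_nil rest)
        | cons q qs => simp [splitM, h, List.modifyHead]
      · have hpre : List.isPrefixOf ['m'] (c :: rest) = false := by
          simp [List.isPrefixOf, Ne.symm hc]
        rw [show PySem.Chars.splitOn.go ['m'] (f + 1) (c :: rest) cur acc
              = PySem.Chars.splitOn.go ['m'] f rest (c :: cur) acc from by
          conv_lhs => rw [PySem.Chars.splitOn.go]
          simp [hpre]]
        rw [ih _ _ _ (by simpa using hf)]
        cases h : splitM rest with
        | nil => exact absurd h (splitM_ne_nil rest)
        | cons q qs => simp [splitM, hc, h, List.modifyHead]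

theorem splitOn_eq_splitM (l : List Char) : PySem.Chars.splitOn l ['m'] = splitM l := by
  rw [PySem.Chars.splitOn, splitOn_go_eq _ _ _ _ (by omega)]
  cases h : splitM l with
  | nil => exact absurd h (splitM_ne_nil l)
  | cons q qs => simp [List.modifyHead]

theorem mPos_eq_filter (l : List Char) :
    mPos l = (List.range l.length).filter (fun j => l[j]? == some 'm') := by
  induction l with
  | nil => simp [mPos]
  | cons c t ih =>
    simp only [mPos, List.length_cons, List.range_succ_eq_map, List.filter_cons,
      List.filter_map, ih]
    by_cases hc : c = 'm'
    · subst hc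
      simp [Function.comp_def, Nat.succ_eq_add_one]
    · simp [hc, Function.comp_def, Nat.succ_eq_add_one]

-- B's one-char slice test equals the indexed-char test
theorem slice_one_char (i : String) (n : Nat) :
    (PySem.Str.slice i (some (n : Int)) (some ((n : Int) + 1)) = "(") ↔ i.toList[n]? = some '(' := by
  rw [← String.toList_inj, PySem.Str.toList_slice, PySem.Chars.slice_eq_listSlice]
  rw [show ((n : Int) + 1) = ((n + 1 : Nat) : Int) by push_cast; ring]
  rw [PySem.List.slice_natCast]
  simp [List.take_one, List.head?_drop]

-- B's step at an 'm'-position equals A's step there (they agree even past the end,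
-- where A's port returns possible and B's slice is empty)
theorem step_eq (i : String) (possible : List String) (t : Nat) :
    stepB i possible (t : Int)
      = (match PySem.Str.pyGet? i ((t : Int) + 3) with
         | some c => if c = '(' then possible ++ [PySem.Str.slice i (some (t : Int)) (some ((t : Int) + 12))] else possible
         | none => possible) := by
  unfold stepB
  rw [show ((t : Int) + 4) = (((t + 3 : Nat) : Int)) + 1 by push_cast; ring,
      show ((t : Int) + 3) = ((t + 3 : Nat) : Int) by push_cast; ring]
  by_cases hp : i.toList[t + 3]? = some '('
  · rw [if_pos ((slice_one_char i (t + 3)).mpr hp)]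
    rw [PySem.Str.pyGet?_natCast, hp]
    simp
  · rw [if_neg (fun h => hp ((slice_one_char i (t + 3)).mp h))]
    rw [PySem.Str.pyGet?_natCast]
    rcases hq : i.toList[t + 3]? with _ | c
    · rfl
    · have hc : c ≠ '(' := fun hc => hp (by rw [hq, hc])
      simp [hc]

-- the part walk of B visits exactly the 'm' positions, in order
theorem walk_eq (i : String) (l : List Char) :
    ∀ (k : Nat) (possible : List String),
    (((splitM l).drop 1).foldl
        (fun (st : List String × Int) (part : List Char) =>
          (stepB i st.1 st.2, st.2 + 1 + (part.length : Int)))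
        (possible, (k : Int) + (((splitM l).headD []).length : Int))).1
      = (mPos l).foldl (fun (p : List String) (j : Nat) => stepB i p ((k : Int) + (j : Int))) possible := by
  induction l with
  | nil => intro k possible; simp [splitM, mPos]
  | cons c t ih =>
    intro k possible
    rcases h : splitM t with _ | ⟨q0, qs⟩
    · exact absurd h (splitM_ne_nil t)
    have shift : ∀ (p0 : List String),
        (fun (p : List String) (j : Nat) => stepB i p ((k : Int) + ((j + 1 : Nat) : Int)))
          = (fun (p : List String) (j : Nat) => stepB i p (((k + 1 : Nat) : Int) + (j : Int))) := by
      intro _; funext p j; congr 1; push_cast; ring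
    by_cases hc : c = 'm'
    · subst hc
      have key := ih (k + 1) (stepB i possible ((k : Int) + ((0 : Nat) : Int)))
      rw [h] at key
      simp only [List.drop_one, List.tail_cons, List.headD_cons] at key
      simp only [splitM, mPos, h, ite_true, if_pos rfl, List.headD_cons, List.drop_one,
        List.tail_cons, List.length_nil, List.foldl_cons, List.foldl_map]
      rw [show (k : Int) + ((0 : Nat) : Int) + 1 + (q0.length : Int)
            = ((k + 1 : Nat) : Int) + (q0.length : Int) by push_cast; ring]
      rw [show ((0 : Nat) : Int) = ((0 : Nat) : Int) from rfl] at key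
      rw [key, shift possible]
    · have key := ih (k + 1) possible
      rw [h] at key
      simp only [List.drop_one, List.tail_cons, List.headD_cons] at key
      simp only [splitM, if_neg hc, h, mPos, if_neg hc, List.modifyHead,
        List.headD_cons, List.drop_one, List.tail_cons, List.foldl_map]
      rw [show (k : Int) + ((c :: q0).length : Int)
            = ((k + 1 : Nat) : Int) + (q0.length : Int) by simp; push_cast; ring]
      rw [key, shift possible]

-- per-string bodies of the two outer folds agree
theorem inner_eq (i : String) (possible : List String) :
    (let parts := (PySem.Str.split? i "m").getD []
     ((parts.drop 1).foldl (fun (st : List String × Int) part =>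
        (if PySem.Str.slice i (some (st.2 + 3)) (some (st.2 + 4)) = "(" then
           st.1 ++ [PySem.Str.slice i (some st.2) (some (st.2 + 12))]
         else st.1,
         st.2 + 1 + PySem.Str.len part))
      (possible, PySem.Str.len (parts.headD ""))).1)
    = (PySem.List.pyRange 0 (PySem.Str.len i) 1).foldl (fun possible j =>
        if PySem.Str.pyGet? i j = some 'm' then
          match PySem.Str.pyGet? i (j + 3) with
          | some c => if c = '(' then possible ++ [PySem.Str.slice i (some j) (some (j + 12))] else possible
          | none => possible
        else possible) possible := by
  -- reduce the B side to the Chars-level walk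
  have hsplit : (PySem.Str.split? i "m").getD []
      = (splitM i.toList).map String.ofList := by
    rw [PySem.Str.split?]
    simp [PySem.Chars.split?, splitOn_eq_splitM]
  rcases h : splitM i.toList with _ | ⟨q0, qs⟩
  · exact absurd h (splitM_ne_nil i.toList)
  have hB := walk_eq i i.toList 0 possible
  rw [h] at hB
  simp only [List.drop_one, List.tail_cons, List.headD_cons, Nat.cast_zero, zero_add] at hB
  simp only [hsplit, h, List.map_cons, List.drop_one, List.tail_cons, List.headD_cons,
    List.foldl_map]
  have hlen : ∀ q : List Char, PySem.Str.len (String.ofList q) = (q.length : Int) := by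
    intro q; rw [PySem.Str.len_eq]; simp
  simp only [hlen]
  rw [show (List.foldl (fun (st : List String × Int) (part : List Char) =>
        (if PySem.Str.slice i (some (st.2 + 3)) (some (st.2 + 4)) = "(" then
           st.1 ++ [PySem.Str.slice i (some st.2) (some (st.2 + 12))]
         else st.1, st.2 + 1 + (part.length : Int)))
        (possible, (q0.length : Int)) qs)
      = (List.foldl (fun (st : List String × Int) (part : List Char) =>
          (stepB i st.1 st.2, st.2 + 1 + (part.length : Int)))
          (possible, (q0.length : Int)) qs) from rfl]
  rw [hB]
  -- reduce the A side to a fold over List.range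
  rw [PySem.Str.len_eq, PySem.List.pyRange_zero_natCast, List.foldl_map]
  simp only [PySem.Str.pyGet?_natCast]
  -- both are the fold of the same step over the 'm' positions
  rw [mPos_eq_filter, List.foldl_filter]
  apply congrFun
  apply congrFun
  congr 1
  funext p j
  by_cases hm : i.toList[j]? = some 'm'
  · simp only [hm, beq_self_eq_true, if_true, if_pos rfl]
    exact step_eq i p j
  · simp [hm]

-- ===== VERDICT (by name: the statement is the Claim_ definition above) =====
theorem look_for_m_spec : Claim_equal_look_for_m := by
  intro input _ _
  unfold Spec_look_for_m look_for_m look_for_m_alt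
  congr 1
  funext possible i
  exact (inner_eq i possible).symm
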